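-- pv_equiv track=rewrite | github.com/muhapauka-rgb/Rent-V7 | ocr-service/app.py | _serial_tail_match_len
-- ===== SOURCE A (Python) =====
-- from typing import Optional, Tuple
--
-- def _normalize_digits_string(v) -> Optional[str]:
--     if v is None:
--         return None
--     s = str(v)
--     d = "".join(ch for ch in s if ch.isdigit())
--     return d or None
--
-- def _serial_tail_match_len(a: Optional[str], b: Optional[str]) -> int:
--     da = _normalize_digits_string(a)
--     db = _normalize_digits_string(b)
--     if not da or not db:
--         return 0
--     n = min(len(da), len(db))
--     m = 0
--     for i in range(1, n + 1):
--         if da[-i] != db[-i]: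
--             break
--         m += 1
--     return m
-- ===== SOURCE B (Python) =====
-- from typing import Optional
--
-- def _normalize_digits_string(v) -> Optional[str]:
--     if v is None:
--         return None
--     s = str(v)
--     d = "".join(ch for ch in s if ch.isdigit())
--     return d or None
--
-- def _serial_tail_match_len(a: Optional[str], b: Optional[str]) -> int:
--     # Binary search for the largest k such that the last k digits agree:
--     # a length-k suffix match implies every shorter suffix matches, so the
--     # predicate "da[-k:] == db[-k:]" is monotone in k and bisection applies.
--     da = _normalize_digits_string(a)
--     db = _normalize_digits_string(b)
--     if not da or not db:
--         return 0
--     lo, hi = 0, min(len(da), len(db))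
--     while lo < hi:
--         mid = (lo + hi + 1) // 2
--         if da[-mid:] == db[-mid:]:
--             lo = mid
--         else:
--             hi = mid - 1
--     return lo
-- ===== Notes on version B (the rewrite author's own statement) =====
-- stated objective: alternative
-- what changed: Replaces A's per-index backward walk with a binary search (bisection) for the largest k whose length-k suffixes are equal, exploiting monotonicity of suffix agreement and comparing whole slices per probe.
import Mathlib
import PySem

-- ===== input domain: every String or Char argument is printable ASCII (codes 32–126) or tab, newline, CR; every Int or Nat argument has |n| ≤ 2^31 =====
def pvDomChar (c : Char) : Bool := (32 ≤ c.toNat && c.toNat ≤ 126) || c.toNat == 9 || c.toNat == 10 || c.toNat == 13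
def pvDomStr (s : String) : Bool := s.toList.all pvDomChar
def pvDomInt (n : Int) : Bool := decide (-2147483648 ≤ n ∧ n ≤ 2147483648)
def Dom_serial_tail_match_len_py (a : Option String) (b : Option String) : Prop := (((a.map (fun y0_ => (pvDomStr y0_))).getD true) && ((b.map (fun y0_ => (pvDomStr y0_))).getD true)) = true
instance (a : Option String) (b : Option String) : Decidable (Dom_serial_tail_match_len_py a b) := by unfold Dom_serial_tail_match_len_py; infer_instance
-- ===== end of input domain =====

-- B replaces A's per-index backward walk with a binary search (bisection) for the
-- largest k whose length-k suffixes agree; same result, a different algorithm.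


-- ===== PORT A =====
-- _normalize_digits_string: str(v) is the identity on str; keep the filtered digits as List Char
def pvNormalizeDigits (v : Option String) : Option (List Char) :=
  match v with
  | none => none
  | some s =>
    let d := s.toList.filter PySem.Chars.isdigit
    if d = [] then none else some d

-- the 'for i in range(1, n + 1): if da[-i] != db[-i]: break; m += 1' loop
def pvTailLoopA (da db : List Char) (n i m : Int) : Int :=
  if _h : i ≤ n then
    match PySem.List.pyGet? da (-i), PySem.List.pyGet? db (-i) with
    | some x, some y => if x ≠ y then m else pvTailLoopA da db n (i + 1) (m + 1)
    | _, _ => m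
  else m
termination_by (n + 1 - i).toNat
decreasing_by omega

def serial_tail_match_len_py (a : Option String) (b : Option String) : Int :=
  match pvNormalizeDigits a, pvNormalizeDigits b with
  | some da, some db => pvTailLoopA da db (min da.length db.length : Nat) 1 0
  | _, _ => 0

-- ===== PORT B =====
-- the 'while lo < hi: mid = (lo+hi+1)//2; if da[-mid:] == db[-mid:]: lo = mid else: hi = mid-1' loop
def pvBSLoop (da db : List Char) (lo hi : Int) : Int :=
  if _h : lo < hi then
    let mid := PySem.Int.floordiv (lo + hi + 1) 2
    if PySem.List.slice da (some (-mid)) none = PySem.List.slice db (some (-mid)) none then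
      pvBSLoop da db mid hi
    else
      pvBSLoop da db lo (mid - 1)
  else lo
termination_by (hi - lo).toNat
decreasing_by
  · have h : PySem.Int.floordiv (lo + hi + 1) 2 = (lo + hi + 1) / 2 :=
      PySem.Int.floordiv_eq_ediv_of_pos (by omega)
    omega
  · have h : PySem.Int.floordiv (lo + hi + 1) 2 = (lo + hi + 1) / 2 :=
      PySem.Int.floordiv_eq_ediv_of_pos (by omega)
    omega

def serial_tail_match_len_py_alt (a : Option String) (b : Option String) : Int :=
  match pvNormalizeDigits a, pvNormalizeDigits b with
  | some da, some db => pvBSLoop da db 0 (min da.length db.length : Nat)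
  | _, _ => 0

-- ===== PRECONDITION & SPEC =====
def Spec_serial_tail_match_len_py (a : Option String) (b : Option String) (out : Int) : Prop := out = serial_tail_match_len_py_alt a b
instance (a : Option String) (b : Option String) (out : Int) : Decidable (Spec_serial_tail_match_len_py a b out) := by unfold Spec_serial_tail_match_len_py; infer_instance

-- ===== CLAIM =====
def Claim_equal_serial_tail_match_len_py : Prop := ∀ (a : Option String) (b : Option String), Dom_serial_tail_match_len_py a b → Spec_serial_tail_match_len_py a b (serial_tail_match_len_py a b)

-- ===== LEMMAS AND PROOFS =====
-- common-prefix length of two char lists: the shared value both loops compute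
def pvPrefLen : List Char → List Char → Int
  | x :: xs, y :: ys => if x = y then 1 + pvPrefLen xs ys else 0
  | _, _ => 0

lemma pvPrefLen_nil_right (xs : List Char) : pvPrefLen xs [] = 0 := by
  cases xs <;> rfl

lemma pvPrefLen_nil_left (ys : List Char) : pvPrefLen [] ys = 0 := by
  cases ys <;> rfl

lemma pvPrefLen_nonneg (xs ys : List Char) : 0 ≤ pvPrefLen xs ys := by
  induction xs generalizing ys with
  | nil => rw [pvPrefLen_nil_left]
  | cons x xs ih =>
    cases ys with
    | nil => rw [pvPrefLen_nil_right]
    | cons y ys =>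
      simp only [pvPrefLen]
      split_ifs
      · have := ih ys; omega
      · omega

lemma pvPrefLen_le (xs ys : List Char) :
    pvPrefLen xs ys ≤ min xs.length ys.length := by
  induction xs generalizing ys with
  | nil => rw [pvPrefLen_nil_left]; simp
  | cons x xs ih =>
    cases ys with
    | nil => rw [pvPrefLen_nil_right]; simp
    | cons y ys =>
      simp only [pvPrefLen, List.length_cons]
      split_ifs
      · have := ih ys; push_cast; push_cast at this; omega
      · push_cast; omega

-- take characterization: for k within both lengths, the k-prefixes agree iff k ≤ pvPrefLen
lemma pvPrefLen_take_iff (xs ys : List Char) (k : Nat)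
    (hx : k ≤ xs.length) (hy : k ≤ ys.length) :
    xs.take k = ys.take k ↔ (k : Int) ≤ pvPrefLen xs ys := by
  induction xs generalizing ys k with
  | nil =>
    have : k = 0 := by simpa using hx
    subst this
    simp [pvPrefLen_nil_left]
  | cons x xs ih =>
    cases k with
    | zero => simp [pvPrefLen_nonneg]
    | succ k =>
      cases ys with
      | nil => simp at hy
      | cons y ys =>
        simp only [List.take_succ_cons, pvPrefLen]
        by_cases hxy : x = y
        · subst hxy
          rw [if_pos rfl]
          have := ih ys k (by simpa using hx) (by simpa using hy)
          constructor
          · intro h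
            have h' : xs.take k = ys.take k := by simpa using h
            have := this.mp h'; push_cast; omega
          · intro h
            have : (k : Int) ≤ pvPrefLen xs ys := by push_cast at h; omega
            have h2 := (ih ys k (by simpa using hx) (by simpa using hy)).mpr this
            simp [h2]
        · rw [if_neg hxy]
          constructor
          · intro h
            simp only [List.cons.injEq] at h
            exact absurd h.1 hxy
          · intro h; exfalso; push_cast at h; omega

-- A's loop computes pvPrefLen of the reversed digit lists
lemma pvTailLoop_eq (da db : List Char) :
    ∀ (j k : Nat) (m : Int), min da.length db.length - k = j →
      k ≤ min da.length db.length →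
      pvTailLoopA da db (min da.length db.length : Nat) ((k : Int) + 1) m
        = m + pvPrefLen (da.reverse.drop k) (db.reverse.drop k) := by
  intro j
  induction j with
  | zero =>
    intro k m hj hk
    have hk' : k = min da.length db.length := by omega
    rw [pvTailLoopA]
    rw [dif_neg (by push_cast; omega)]
    have h : da.reverse.drop k = [] ∨ db.reverse.drop k = [] := by
      rcases Nat.le_total da.length db.length with h | h
      · left; rw [List.drop_eq_nil_iff]; simp; omega
      · right; rw [List.drop_eq_nil_iff]; simp; omega
    rcases h with h | h
    · rw [h, pvPrefLen_nil_left]; ring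
    · rw [h, pvPrefLen_nil_right]; ring
  | succ j ih =>
    intro k m hj hk
    have hklt : k < min da.length db.length := by omega
    have hka : k + 1 ≤ da.length := by omega
    have hkb : k + 1 ≤ db.length := by omega
    rw [pvTailLoopA]
    rw [dif_pos (by push_cast; omega)]
    have hcast : (-((k : Int) + 1)) = -((k + 1 : Nat) : Int) := by push_cast; ring
    rw [hcast,
      PySem.List.pyGet?_neg_natCast da (k + 1) (by omega) hka,
      PySem.List.pyGet?_neg_natCast db (k + 1) (by omega) hkb]
    have hia : da.length - (k + 1) < da.length := by omega
    have hib : db.length - (k + 1) < db.length := by omega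
    rw [List.getElem?_eq_getElem hia, List.getElem?_eq_getElem hib]
    have hda : da.reverse.drop k = da[da.length - (k + 1)] :: da.reverse.drop (k + 1) := by
      rw [List.drop_eq_getElem_cons (by simp; omega)]
      congr 1
      rw [List.getElem_reverse]
      congr 1
      omega
    have hdb : db.reverse.drop k = db[db.length - (k + 1)] :: db.reverse.drop (k + 1) := by
      rw [List.drop_eq_getElem_cons (by simp; omega)]
      congr 1
      rw [List.getElem_reverse]
      congr 1
      omega
    rw [hda, hdb]
    simp only [pvPrefLen]
    by_cases heq : da[da.length - (k + 1)] = db[db.length - (k + 1)]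
    · rw [if_neg (by simp [heq]), if_pos heq]
      have : ((k : Int) + 1 + 1) = ((k + 1 : Nat) : Int) + 1 := by push_cast; ring
      rw [this, ih (k + 1) (m + 1) (by omega) (by omega)]
      ring
    · rw [if_pos (by simp [heq]), if_neg heq]
      ring

-- the slice test da[-mid:] == db[-mid:] decides 'mid ≤ pvPrefLen of the reverses'
lemma pvSliceTest_iff (da db : List Char) (mid : Int)
    (h1 : 1 ≤ mid) (ha : mid ≤ (da.length : Int)) (hb : mid ≤ (db.length : Int)) :
    (PySem.List.slice da (some (-mid)) none = PySem.List.slice db (some (-mid)) none)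
      ↔ mid ≤ pvPrefLen da.reverse db.reverse := by
  have hmid : mid = (mid.toNat : Int) := by omega
  rw [hmid,
    PySem.List.slice_from_neg_natCast da mid.toNat (by omega),
    PySem.List.slice_from_neg_natCast db mid.toNat (by omega)]
  have hda : da.drop (da.length - mid.toNat) = (da.reverse.take mid.toNat).reverse := by
    rw [List.take_reverse, List.reverse_reverse]
  have hdb : db.drop (db.length - mid.toNat) = (db.reverse.take mid.toNat).reverse := by
    rw [List.take_reverse, List.reverse_reverse]
  rw [hda, hdb, List.reverse_inj]
  exact pvPrefLen_take_iff da.reverse db.reverse mid.toNat (by simp; omega) (by simp; omega)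

-- B's bisection loop converges to pvPrefLen of the reverses
lemma pvBSLoop_eq (da db : List Char) :
    ∀ (fuel : Nat) (lo hi : Int), (hi - lo).toNat ≤ fuel → 0 ≤ lo →
      lo ≤ pvPrefLen da.reverse db.reverse →
      pvPrefLen da.reverse db.reverse ≤ hi →
      hi ≤ (min da.length db.length : Nat) →
      pvBSLoop da db lo hi = pvPrefLen da.reverse db.reverse := by
  intro fuel
  induction fuel with
  | zero =>
    intro lo hi hf _ hlo hhi _
    rw [pvBSLoop, dif_neg (by omega)]
    omega
  | succ fuel ih =>
    intro lo hi hf hlo0 hlo hhi hn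
    by_cases hlh : lo < hi
    · rw [pvBSLoop, dif_pos hlh]
      have hb : PySem.Int.floordiv (lo + hi + 1) 2 = (lo + hi + 1) / 2 :=
        PySem.Int.floordiv_eq_ediv_of_pos (by omega)
      show (if PySem.List.slice da (some (-(PySem.Int.floordiv (lo + hi + 1) 2))) none
              = PySem.List.slice db (some (-(PySem.Int.floordiv (lo + hi + 1) 2))) none then
            pvBSLoop da db (PySem.Int.floordiv (lo + hi + 1) 2) hi
          else pvBSLoop da db lo (PySem.Int.floordiv (lo + hi + 1) 2 - 1))
          = pvPrefLen da.reverse db.reverse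
      set mid := PySem.Int.floordiv (lo + hi + 1) 2 with hmid
      have h1 : 1 ≤ mid := by omega
      have hminA : min da.length db.length ≤ da.length := Nat.min_le_left _ _
      have hminB : min da.length db.length ≤ db.length := Nat.min_le_right _ _
      have hna : mid ≤ (da.length : Int) := by omega
      have hnb : mid ≤ (db.length : Int) := by omega
      have hiff := pvSliceTest_iff da db mid h1 hna hnb
      by_cases ht : mid ≤ pvPrefLen da.reverse db.reverse
      · rw [if_pos (hiff.mpr ht)]
        exact ih mid hi (by omega) (by omega) ht hhi hn
      · rw [if_neg (fun hc => ht (hiff.mp hc))]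
        exact ih lo (mid - 1) (by omega) hlo0 hlo (by omega) (by omega)
    · rw [pvBSLoop, dif_neg hlh]
      omega

-- ===== VERDICT =====
theorem serial_tail_match_len_py_spec : Claim_equal_serial_tail_match_len_py := by
  intro a b _
  unfold Spec_serial_tail_match_len_py serial_tail_match_len_py serial_tail_match_len_py_alt
  cases pvNormalizeDigits a with
  | none => rfl
  | some da =>
    cases pvNormalizeDigits b with
    | none => rfl
    | some db =>
      simp only
      have hA := pvTailLoop_eq da db (min da.length db.length) 0 0 (by omega) (by omega)
      have hle := pvPrefLen_le da.reverse db.reverse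
      simp only [List.length_reverse] at hle
      have hB := pvBSLoop_eq da db ((min da.length db.length : Nat) : Int).toNat 0
        ((min da.length db.length : Nat) : Int) (by omega) le_rfl
        (pvPrefLen_nonneg _ _) (by omega) (by omega)
      rw [hB]
      simpa using hA
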